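-- pv_equiv track=rewrite | github.com/S0jer/algorithms-and-data-structures-course-2021 | Offline/zad8.py | BFS
-- ===== SOURCE A (Python) =====
-- import queue
--
-- def BFS(G, s):
--     n = len(G)
--     Q = queue.Queue()
--
--     l = [0] * n
--     v = [-1] * n
--
--     v[s] = 1
--     Q.put(s)
--     w = 1
--
--     while not Q.empty():
--         u = Q.get()
--         for i in range(n):
--             if G[u][i] == 1:
--                 # liczenie stopnia każdego wierzchołka
--                 l[u] += 1
--             if v[i] != 1 and G[u][i] == 1:
--                 # liczenie odwiedzonych wierzchołków
--                 w += 1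
--                 v[i] = 1
--                 Q.put(i)
--
--     return l, w
-- ===== SOURCE B (Python) =====
-- def BFS(G, s):
--     n = len(G)
--     # Fixed-point saturation (no queue/worklist): repeatedly sweep all vertices,
--     # marking neighbours of already-reached vertices, until a sweep changes nothing.
--     reach = [False] * n
--     reach[s] = True
--     changed = True
--     while changed:
--         changed = False
--         for u in range(n):
--             if reach[u]:
--                 for i in range(n):
--                     if G[u][i] == 1 and not reach[i]:
--                         reach[i] = True
--                         changed = True
--     # Degrees of reached vertices in a separate pass; unreached stay 0.
--     l = [sum(1 for i in range(n) if G[u][i] == 1) if reach[u] else 0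
--          for u in range(n)]
--     return l, sum(reach)
-- ===== Notes on version B (the rewrite author's own statement) =====
-- stated objective: alternative
-- what changed: A is a queue-driven BFS that interleaves degree counting and visit counting inside one loop; B has no queue or worklist at all: it computes the reachable set by fixed-point saturation (repeated full sweeps marking neighbours of reached vertices until a sweep changes nothing), then fills degrees in a separate pass and counts reached vertices with sum(reach).
-- outside the precondition, e.g. on BFS([[1, 0], []], 0): A returns ([1, 0], 1), B returns ([1, 0], 1)
import Mathlib
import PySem

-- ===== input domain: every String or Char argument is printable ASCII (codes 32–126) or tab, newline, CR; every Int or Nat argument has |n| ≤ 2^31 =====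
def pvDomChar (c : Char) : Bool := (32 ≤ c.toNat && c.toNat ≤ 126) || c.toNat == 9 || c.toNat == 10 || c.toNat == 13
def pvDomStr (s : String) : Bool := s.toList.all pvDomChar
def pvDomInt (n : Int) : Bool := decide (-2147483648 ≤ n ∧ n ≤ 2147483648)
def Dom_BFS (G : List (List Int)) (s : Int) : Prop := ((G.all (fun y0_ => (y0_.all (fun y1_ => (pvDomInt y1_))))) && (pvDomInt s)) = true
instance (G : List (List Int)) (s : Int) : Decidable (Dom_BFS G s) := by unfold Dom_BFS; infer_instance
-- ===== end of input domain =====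

-- B replaces A's queue-driven BFS by worklist-free fixed-point saturation (repeated full
-- sweeps until nothing changes) plus a separate degree pass; objective: alternative
-- algorithm, same exact result.

-- ===== PORT A =====
-- Transliteration of A.  queue.Queue is FIFO: get from the head, put at the tail.
-- The while loop is fuel recursion; under Pre_BFS every vertex is enqueued at most once,
-- so at most n iterations happen and fuel n+1 is never exhausted (a totality device only).
-- v[s] = 1 / Q.put(s): Python's negative-index rule addresses n+s for -n ≤ s < 0;
-- Pre_BFS keeps s in [-n, n), so the (if s < 0 then s + n else s).toNat below is exact.
-- G[u][i] is read with getD; Pre_BFS guarantees every row has length ≥ n, where getD = Python indexing.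
def stepA (row : List Int) (u : Nat) (st : List Int × List Int × Int × List Nat) (i : Nat) :
    List Int × List Int × Int × List Nat :=
  match st with
  | (l, v, w, Q) =>
    let l' := if row.getD i 0 = 1 then l.set u (l.getD u 0 + 1) else l
    if v.getD i 0 ≠ 1 ∧ row.getD i 0 = 1 then (l', v.set i 1, w + 1, Q ++ [i])
    else (l', v, w, Q)

def loopA (G : List (List Int)) (n : Nat) :
    Nat → List Int × List Int × Int × List Nat → List Int × Int
  | 0, (l, _, w, _) => (l, w)
  | fuel + 1, (l, v, w, Q) =>
    match Q with
    | [] => (l, w)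
    | u :: Q' => loopA G n fuel ((List.range n).foldl (stepA (G.getD u []) u) (l, v, w, Q'))

def BFS (G : List (List Int)) (s : Int) : List Int × Int :=
  let n := G.length
  let sN : Nat := (if s < 0 then s + n else s).toNat
  loopA G n (n + 1) (List.replicate n 0, (List.replicate n (-1)).set sN 1, 1, [sN])

-- ===== PORT B =====
-- Transliteration of Source B.  The inner 'for i in range(n)' of a sweep is satStepB folded over
-- range n; 'for u in range(n): if reach[u]: …' is satPassU folded over range n, threading the
-- (reach, changed) pair; the 'while changed' loop is satLoop on fuel (each repeated sweep marks
-- at least one new vertex, so fuel n+1 is never exhausted — a totality device only).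
def satStepB (row : List Int) (st : List Bool × Bool) (i : Nat) : List Bool × Bool :=
  if row.getD i 0 = 1 ∧ st.1.getD i false = false then (st.1.set i true, true) else st

def satPassU (G : List (List Int)) (n : Nat) (st : List Bool × Bool) (u : Nat) :
    List Bool × Bool :=
  if st.1.getD u false = true then (List.range n).foldl (satStepB (G.getD u [])) st else st

def satPass (G : List (List Int)) (n : Nat) (r : List Bool) : List Bool × Bool :=
  (List.range n).foldl (satPassU G n) (r, false)

def satLoop (G : List (List Int)) (n : Nat) : Nat → List Bool → List Bool
  | 0, r => r
  | fuel + 1, r =>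
    let p := satPass G n r
    if p.2 then satLoop G n fuel p.1 else p.1

-- sum(1 for i in range(n) if G[u][i] == 1)
def degB (G : List (List Int)) (n : Nat) (u : Nat) : Int :=
  (List.range n).foldl (fun a i => if (G.getD u []).getD i 0 = 1 then a + 1 else a) 0

-- sum(reach)
def sumReach (r : List Bool) : Int :=
  r.foldl (fun a b => if b then a + 1 else a) 0

def BFS_alt (G : List (List Int)) (s : Int) : List Int × Int :=
  let n := G.length
  let sN : Nat := (if s < 0 then s + n else s).toNat
  let r := satLoop G n (n + 1) ((List.replicate n false).set sN true)
  ((List.range n).map (fun u => if r.getD u false then degB G n u else 0), sumReach r)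

-- ===== PRECONDITION & SPEC =====
-- Pre_BFS: G nonempty, s a valid (possibly negative) index into G, and every row of length
-- ≥ len(G), so that every G[u][i] access is in range.  This slightly over-approximates where
-- A raises (IndexError): a too-short row belonging to an UNREACHABLE vertex is never indexed,
-- so A (and B) still return there; such inputs are excluded for uniformity of the row shape.
def Pre_BFS (G : List (List Int)) (s : Int) : Prop :=
  G ≠ [] ∧ -(G.length : Int) ≤ s ∧ s < (G.length : Int) ∧ ∀ row ∈ G, G.length ≤ row.length
instance (G : List (List Int)) (s : Int) : Decidable (Pre_BFS G s) := by
  unfold Pre_BFS; infer_instance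

def pvWitness_BFS : List (List Int) × Int := ([[0, 1, 0], [1, 0, 1], [0, 0, 0]], 1)

def Spec_BFS (G : List (List Int)) (s : Int) (out : List Int × Int) : Prop := out = BFS_alt G s
instance (G : List (List Int)) (s : Int) (out : List Int × Int) : Decidable (Spec_BFS G s out) := by
  unfold Spec_BFS; infer_instance

-- ===== CLAIM (what is proved, stated in full; the proofs are below) =====
def Claim_equal_BFS : Prop :=
  ∀ (G : List (List Int)) (s : Int), Dom_BFS G s → Pre_BFS G s → Spec_BFS G s (BFS G s)

-- ===== LEMMAS AND PROOFS =====

-- proof-only helpers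
def mkv (b : Bool) : Int := if b then 1 else -1

def lupd (l : List Int) (u : Nat) (c : Nat) : List Int :=
  if u < l.length then l.set u (l.getD u 0 + c) else l

def markAll (ms : List Nat) (r : List Bool) : List Bool :=
  ms.foldl (fun a i => a.set i true) r

def pnew (row : List Int) (r : List Bool) (i : Nat) : Bool :=
  !(r.getD i false) && decide (row.getD i 0 = 1)

def pcnt (row : List Int) (i : Nat) : Bool := decide (row.getD i 0 = 1)

def unre (r : List Bool) : Nat := r.countP (fun b => !b)

-- the edge relation read from the matrix, and reachability from a start vertex
def edgeG (G : List (List Int)) (u i : Nat) : Prop := (G.getD u []).getD i 0 = 1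

def Reach (G : List (List Int)) (n sN : Nat) (j : Nat) : Prop :=
  Relation.ReflTransGen (fun a b => a < n ∧ b < n ∧ edgeG G a b) sN j

def ClosedS (G : List (List Int)) (n : Nat) (r : List Bool) : Prop :=
  ∀ u, u < n → r.getD u false = true → ∀ i, i < n → edgeG G u i → r.getD i false = true

lemma getD_set_ne {α : Type} (l : List α) (i j : Nat) (a d : α) (h : i ≠ j) :
    (l.set i a).getD j d = l.getD j d := by
  simp [List.getD, List.getElem?_set_ne h]

lemma getD_set_self {α : Type} (l : List α) (i : Nat) (a d : α) (h : i < l.length) :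
    (l.set i a).getD i d = a := by
  simp [List.getD, List.getElem?_set_self, h]

lemma set_getD_self {α : Type} (l : List α) (i : Nat) (d : α) (h : i < l.length) :
    l.set i (l.getD i d) = l := by
  apply List.ext_getElem
  · simp
  · intro j hj hj'
    rcases eq_or_ne i j with rfl | hne
    · simp [List.getElem_set, List.getD, List.getElem?_eq_getElem h]
    · simp [List.getElem_set, hne]

lemma set_of_length_le {α : Type} (l : List α) (i : Nat) (a : α) (h : l.length ≤ i) :
    l.set i a = l := by
  apply List.ext_getElem
  · simp
  · intro j hj hj'
    have : i ≠ j := by omega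
    simp [List.getElem_set, this]

lemma mkv_getD_ne_one (r : List Bool) (i : Nat) :
    ((r.map mkv).getD i 0 ≠ 1) ↔ (r.getD i false = false) := by
  rcases h : r[i]? with _ | b
  · simp [List.getD, h, List.getElem?_map]
  · cases b <;> simp [List.getD, h, List.getElem?_map, mkv]

lemma markAll_length (ms : List Nat) (r : List Bool) :
    (markAll ms r).length = r.length := by
  induction ms generalizing r with
  | nil => rfl
  | cons i ms ih => simp [markAll, List.foldl_cons] at *; rw [ih]; simp

lemma markAll_getD (ms : List Nat) (r : List Bool) (hms : ∀ i ∈ ms, i < r.length) (j : Nat) :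
    (markAll ms r).getD j false = (r.getD j false || decide (j ∈ ms)) := by
  induction ms generalizing r with
  | nil => simp [markAll]
  | cons i ms ih =>
    have hi : i < r.length := hms i (by simp)
    have hrec := ih (r.set i true) (by intro x hx; simpa using hms x (by simp [hx]))
    simp only [markAll, List.foldl_cons] at *
    rw [hrec]
    rcases eq_or_ne j i with rfl | hne
    · rw [getD_set_self _ _ _ _ hi]
      simp
    · rw [getD_set_ne _ _ _ _ _ (Ne.symm hne)]
      simp [hne]

lemma countP_set_true (r : List Bool) (i : Nat) (hi : i < r.length)
    (hf : r.getD i false = false) :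
    (r.set i true).countP (fun b => !b) + 1 = r.countP (fun b => !b) := by
  induction r generalizing i with
  | nil => simp at hi
  | cons b t ih =>
    cases i with
    | zero =>
      simp [List.getD] at hf
      simp [hf, List.countP_cons]
    | succ i =>
      have := ih i (by simpa using hi) (by simpa [List.getD] using hf)
      simp [List.countP_cons, List.set]
      omega

lemma unre_markAll (ms : List Nat) (r : List Bool) (hnd : ms.Nodup)
    (hms : ∀ i ∈ ms, i < r.length ∧ r.getD i false = false) :
    unre (markAll ms r) + ms.length = unre r := by
  induction ms generalizing r with
  | nil => simp [markAll, unre]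
  | cons i ms ih =>
    obtain ⟨hi, hf⟩ := hms i (by simp)
    have hnd' := (List.nodup_cons.mp hnd).2
    have hni := (List.nodup_cons.mp hnd).1
    have hrec := ih (r.set i true) hnd' (by
      intro x hx
      have hne : i ≠ x := fun h => hni (h ▸ hx)
      obtain ⟨h1, h2⟩ := hms x (by simp [hx])
      exact ⟨by simpa using h1, by rw [getD_set_ne _ _ _ _ _ hne]; exact h2⟩)
    have hc := countP_set_true r i hi hf
    simp only [markAll] at hrec ⊢
    simp only [List.foldl_cons]
    simp only [unre] at hrec ⊢
    simp only [List.length_cons]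
    omega

lemma unre_le_length (r : List Bool) : unre r ≤ r.length := List.countP_le_length

lemma cntTrue_unre (r : List Bool) : r.countP (fun b => b) + unre r = r.length := by
  induction r with
  | nil => simp [unre]
  | cons b t ih =>
    cases b <;> simp [unre, List.countP_cons] at * <;> omega

lemma sumReach_aux (r : List Bool) (a : Int) :
    r.foldl (fun a b => if b then a + 1 else a) a = a + (r.countP (fun b => b) : Int) := by
  induction r generalizing a with
  | nil => simp
  | cons b t ih =>
    cases b
    · simp [ih]
    · simp only [List.foldl_cons, if_pos]
      rw [ih]
      simp [List.countP_cons]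
      push_cast
      ring

lemma sumReach_eq (r : List Bool) : sumReach r = ((r.length - unre r : Nat) : Int) := by
  have h := cntTrue_unre r
  unfold sumReach
  rw [sumReach_aux]
  have : r.countP (fun b => b) = r.length - unre r := by omega
  rw [this]
  simp

lemma foldl_count_filter (row : List Int) (is : List Nat) (a : Int) :
    is.foldl (fun a i => if row.getD i 0 = 1 then a + 1 else a) a
      = a + ((is.filter (pcnt row)).length : Int) := by
  induction is generalizing a with
  | nil => simp
  | cons i is ih =>
    by_cases h : row.getD i 0 = 1
    · simp only [List.foldl_cons]
      rw [if_pos h, ih]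
      have hp : pcnt row i = true := by unfold pcnt; exact decide_eq_true h
      have hfc : List.filter (pcnt row) (i :: is) = i :: List.filter (pcnt row) is := by
        rw [List.filter_cons, if_pos hp]
      rw [hfc, List.length_cons]
      push_cast
      ring
    · simp only [List.foldl_cons]
      rw [if_neg h, ih]
      have hp : pcnt row i = false := by unfold pcnt; exact decide_eq_false h
      rw [List.filter_cons, if_neg (by simp [hp])]

lemma degB_eq_filter (G : List (List Int)) (n : Nat) (u : Nat) :
    degB G n u = (((List.range n).filter (pcnt (G.getD u []))).length : Int) := by
  simpa using foldl_count_filter (G.getD u []) (List.range n) 0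

-- reachable vertices lie in every closed set containing the start
lemma reach_mem_closed (G : List (List Int)) (n sN : Nat) (r : List Bool)
    (hC : ClosedS G n r) (hs : r.getD sN false = true) :
    ∀ j, Reach G n sN j → r.getD j false = true := by
  intro j h
  induction h with
  | refl => exact hs
  | tail _ h2 ih => exact hC _ h2.1 ih _ h2.2.1 h2.2.2

-- === saturation sweep: inner fold over the columns of one row ===
lemma satInner (row : List Int) (is : List Nat) :
    ∀ (r : List Bool) (ch : Bool), (∀ i ∈ is, i < r.length) →
    (is.foldl (satStepB row) (r, ch)).1.length = r.length
    ∧ (∀ j, r.getD j false = true → (is.foldl (satStepB row) (r, ch)).1.getD j false = true)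
    ∧ (∀ j, (is.foldl (satStepB row) (r, ch)).1.getD j false = true →
        r.getD j false = true ∨ (j ∈ is ∧ row.getD j 0 = 1))
    ∧ ((is.foldl (satStepB row) (r, ch)).2 = false →
        ch = false ∧ (is.foldl (satStepB row) (r, ch)).1 = r
        ∧ ∀ i ∈ is, row.getD i 0 = 1 → r.getD i false = true)
    ∧ (ch = true → (is.foldl (satStepB row) (r, ch)).2 = true)
    ∧ unre (is.foldl (satStepB row) (r, ch)).1 ≤ unre r
    ∧ (ch = false → (is.foldl (satStepB row) (r, ch)).2 = true →
        unre (is.foldl (satStepB row) (r, ch)).1 < unre r) := by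
  induction is with
  | nil =>
    intro r ch _
    refine ⟨rfl, fun j h => h, fun j h => Or.inl h, fun h => ⟨h, rfl, by simp⟩,
      fun h => h, le_refl _, ?_⟩
    intro h1 h2
    rw [h1] at h2
    exact absurd h2 (by simp)
  | cons i is ih =>
    intro r ch hlen
    have hi : i < r.length := hlen i (by simp)
    by_cases hc : row.getD i 0 = 1 ∧ r.getD i false = false
    · -- the step fires: mark i, set changed
      have hstep : satStepB row (r, ch) i = (r.set i true, true) := by
        simp only [satStepB]
        rw [if_pos hc]
      have hrec := ih (r.set i true) true
        (by intro x hx; simpa using hlen x (by simp [hx]))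
      rw [List.foldl_cons, hstep] at *
      obtain ⟨e1, e2, e3, e4, e5, e6, e7⟩ := hrec
      have hu : unre (r.set i true) + 1 = unre r := countP_set_true r i hi hc.2
      refine ⟨by rw [e1]; simp, ?_, ?_, ?_, fun _ => e5 rfl, by omega, ?_⟩
      · intro j hj
        apply e2
        rcases eq_or_ne j i with rfl | hne
        · rw [getD_set_self _ _ _ _ hi]
        · rw [getD_set_ne _ _ _ _ _ (Ne.symm hne)]; exact hj
      · intro j hj
        rcases e3 j hj with h | h
        · rcases eq_or_ne j i with rfl | hne
          · exact Or.inr ⟨by simp, hc.1⟩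
          · rw [getD_set_ne _ _ _ _ _ (Ne.symm hne)] at h
            exact Or.inl h
        · exact Or.inr ⟨by simp [h.1], h.2⟩
      · intro hfalse
        have := e5 rfl
        rw [hfalse] at this
        exact absurd this (by simp)
      · intro _ _
        omega
    · -- no change at column i
      have hstep : satStepB row (r, ch) i = (r, ch) := by
        simp only [satStepB]
        rw [if_neg hc]
      have hrec := ih r ch (by intro x hx; exact hlen x (by simp [hx]))
      rw [List.foldl_cons, hstep] at *
      obtain ⟨e1, e2, e3, e4, e5, e6, e7⟩ := hrec
      refine ⟨e1, e2, ?_, ?_, e5, e6, e7⟩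
      · intro j hj
        rcases e3 j hj with h | h
        · exact Or.inl h
        · exact Or.inr ⟨by simp [h.1], h.2⟩
      · intro hfalse
        obtain ⟨f1, f2, f3⟩ := e4 hfalse
        refine ⟨f1, f2, ?_⟩
        intro x hx hrow
        rcases (List.mem_cons.mp hx) with rfl | hx'
        · by_contra hfx
          have : r.getD x false = false := by
            cases h : r.getD x false
            · rfl
            · exact absurd h hfx
          exact hc ⟨hrow, this⟩
        · exact f3 x hx' hrow

-- === saturation sweep: outer fold over the rows ===
lemma satOuter (G : List (List Int)) (n sN : Nat) (us : List Nat) (hus : ∀ u ∈ us, u < n) :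
    ∀ (r : List Bool) (ch : Bool), r.length = n →
    (us.foldl (satPassU G n) (r, ch)).1.length = n
    ∧ (∀ j, r.getD j false = true → (us.foldl (satPassU G n) (r, ch)).1.getD j false = true)
    ∧ ((∀ j, r.getD j false = true → Reach G n sN j) →
        ∀ j, (us.foldl (satPassU G n) (r, ch)).1.getD j false = true → Reach G n sN j)
    ∧ ((us.foldl (satPassU G n) (r, ch)).2 = false →
        ch = false ∧ (us.foldl (satPassU G n) (r, ch)).1 = r
        ∧ ∀ u ∈ us, r.getD u false = true → ∀ i, i < n → edgeG G u i → r.getD i false = true)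
    ∧ (ch = true → (us.foldl (satPassU G n) (r, ch)).2 = true)
    ∧ unre (us.foldl (satPassU G n) (r, ch)).1 ≤ unre r
    ∧ (ch = false → (us.foldl (satPassU G n) (r, ch)).2 = true →
        unre (us.foldl (satPassU G n) (r, ch)).1 < unre r) := by
  induction us with
  | nil =>
    intro r ch hr
    refine ⟨hr, fun j h => h, fun hS j h => hS j h, fun h => ⟨h, rfl, by simp⟩,
      fun h => h, le_refl _, ?_⟩
    intro h1 h2
    rw [h1] at h2
    exact absurd h2 (by simp)
  | cons u us ih =>
    intro r ch hr
    have hun : u < n := hus u (by simp)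
    by_cases hg : r.getD u false = true
    · -- reach[u] is true: run the inner sweep on row u
      have hstep : satPassU G n (r, ch) u
          = (List.range n).foldl (satStepB (G.getD u [])) (r, ch) := by
        simp only [satPassU]
        rw [if_pos hg]
      obtain ⟨i1, i2, i3, i4, i5, i6, i7⟩ :=
        satInner (G.getD u []) (List.range n) r ch (by intro x hx; rw [hr]; simpa using hx)
      rcases hq : (List.range n).foldl (satStepB (G.getD u [])) (r, ch) with ⟨qr, qc⟩
      rw [hq] at i1 i2 i3 i4 i5 i6 i7 hstep
      dsimp only at i1 i2 i3 i4 i5 i6 i7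
      have hrec := ih (by intro x hx; exact hus x (by simp [hx])) qr qc (by rw [i1, hr])
      rw [List.foldl_cons, hstep] at *
      obtain ⟨e1, e2, e3, e4, e5, e6, e7⟩ := hrec
      refine ⟨e1, fun j h => e2 j (i2 j h), ?_, ?_, fun h => e5 (i5 h), le_trans e6 i6, ?_⟩
      · -- soundness
        intro hS j hj
        refine e3 ?_ j hj
        intro x hx
        rcases i3 x hx with h | h
        · exact hS x h
        · exact Relation.ReflTransGen.tail (hS u hg) ⟨hun, by simpa using h.1, h.2⟩
      · -- nothing changed: closedness over the processed rows
        intro hfalse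
        obtain ⟨f1, f2, f3⟩ := e4 hfalse
        obtain ⟨g1, g2, g3⟩ := i4 f1
        subst g2
        refine ⟨g1, by rw [f2], ?_⟩
        intro x hx hxr i hin hie
        rcases (List.mem_cons.mp hx) with rfl | hx'
        · exact g3 i (by simpa using hin) hie
        · exact f3 x hx' hxr i hin hie
      · -- ch false, final true: strictly fewer unreached
        intro h1 h2
        by_cases hq2 : qc = true
        · exact lt_of_le_of_lt e6 (i7 h1 hq2)
        · have hq2' : qc = false := by
            cases h : qc
            · rfl
            · exact absurd h hq2
          obtain ⟨_, g2, _⟩ := i4 hq2'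
          subst g2
          exact e7 hq2' h2
    · -- reach[u] false: the row is skipped
      have hstep : satPassU G n (r, ch) u = (r, ch) := by
        simp only [satPassU]
        rw [if_neg hg]
      have hrec := ih (by intro x hx; exact hus x (by simp [hx])) r ch hr
      rw [List.foldl_cons, hstep] at *
      obtain ⟨e1, e2, e3, e4, e5, e6, e7⟩ := hrec
      refine ⟨e1, e2, e3, ?_, e5, e6, e7⟩
      intro hfalse
      obtain ⟨f1, f2, f3⟩ := e4 hfalse
      refine ⟨f1, f2, ?_⟩
      intro x hx hxr i hin hie
      rcases (List.mem_cons.mp hx) with rfl | hx'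
      · exact absurd hxr hg
      · exact f3 x hx' hxr i hin hie

-- === the whole saturation loop reaches a sound, closed set containing the start ===
lemma satLoop_ok (G : List (List Int)) (n sN : Nat) :
    ∀ (fuel : Nat) (r : List Bool), r.length = n → r.getD sN false = true →
    (∀ j, r.getD j false = true → Reach G n sN j) → unre r + 1 ≤ fuel →
    (satLoop G n fuel r).length = n
    ∧ (satLoop G n fuel r).getD sN false = true
    ∧ (∀ j, (satLoop G n fuel r).getD j false = true → Reach G n sN j)
    ∧ ClosedS G n (satLoop G n fuel r) := by
  intro fuel
  induction fuel with
  | zero =>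
    intro r _ _ _ hf
    omega
  | succ fuel ih =>
    intro r hr hs hS hf
    have hps : satPass G n r = (List.range n).foldl (satPassU G n) (r, false) := rfl
    obtain ⟨e1, e2, e3, e4, e5, e6, e7⟩ :=
      satOuter G n sN (List.range n) (by intro x hx; simpa using hx) r false hr
    rw [← hps] at e1 e2 e3 e4 e5 e6 e7
    have hsl : satLoop G n (fuel + 1) r
        = if (satPass G n r).2 = true then satLoop G n fuel (satPass G n r).1
          else (satPass G n r).1 := rfl
    by_cases hch : (satPass G n r).2 = true
    · have hlt : unre (satPass G n r).1 < unre r := e7 rfl hch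
      rw [hsl, if_pos hch]
      exact ih (satPass G n r).1 e1 (e2 sN hs) (e3 hS) (by omega)
    · have hch' : (satPass G n r).2 = false := by
        cases h : (satPass G n r).2
        · rfl
        · exact absurd h hch
      obtain ⟨_, f2, f3⟩ := e4 hch'
      rw [hsl, if_neg hch, f2]
      exact ⟨hr, hs, hS, fun u hu hur i hin hie => f3 u (by simpa using hu) hur i hin hie⟩

-- === one dequeue step of A's BFS, computed in closed form ===
lemma fold_sim (row : List Int) (u : Nat) (is : List Nat) :
    ∀ (l : List Int) (r : List Bool) (w : Int) (Q : List Nat),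
    is.Nodup → (∀ i ∈ is, i < r.length) →
    is.foldl (stepA row u) (l, r.map mkv, w, Q)
      = (lupd l u ((is.filter (pcnt row)).length),
         (markAll (is.filter (pnew row r)) r).map mkv,
         w + ((is.filter (pnew row r)).length : Int),
         Q ++ is.filter (pnew row r)) := by
  induction is with
  | nil =>
    intro l r w Q _ _
    have h0 : lupd l u (([] : List Nat).filter (pcnt row)).length = l := by
      unfold lupd
      split
      · next h =>
        simp only [List.filter_nil, List.length_nil, Nat.cast_zero, add_zero]
        exact set_getD_self _ _ _ h
      · rfl
    rw [List.foldl_nil, h0]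
    simp [markAll]
  | cons i is ih =>
    intro l r w Q hnd hlen
    have hni : i ∉ is := (List.nodup_cons.mp hnd).1
    have hnd' : is.Nodup := (List.nodup_cons.mp hnd).2
    have hilen : i < r.length := hlen i (by simp)
    have hfilter_new_set : is.filter (pnew row (r.set i true)) = is.filter (pnew row r) := by
      apply List.filter_congr
      intro x hx
      have hne : i ≠ x := fun h => hni (h ▸ hx)
      simp only [pnew]
      rw [getD_set_ne _ _ _ _ _ hne]
    have hlupd1 : ∀ c : Nat, lupd (l.set u (l.getD u 0 + 1)) u c = lupd l u (c + 1) := by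
      intro c
      unfold lupd
      by_cases hu : u < l.length
      · simp only [List.length_set, hu, if_pos]
        rw [List.set_set, getD_set_self _ _ _ _ hu]
        congr 1
        push_cast
        ring
      · rw [if_neg (by rw [List.length_set]; exact hu), if_neg hu,
          set_of_length_le _ _ _ (Nat.le_of_not_lt hu)]
    by_cases h1 : row.getD i 0 = 1
    · have hcnt_cons : (i :: is).filter (pcnt row) = i :: is.filter (pcnt row) := by
        rw [List.filter_cons, if_pos (by unfold pcnt; exact decide_eq_true h1)]
      by_cases h2 : r.getD i false = false
      · -- i is newly reached: mark and enqueue it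
        have hv : (r.map mkv).getD i 0 ≠ 1 := (mkv_getD_ne_one r i).mpr h2
        have hstepA : stepA row u (l, r.map mkv, w, Q) i
            = (l.set u (l.getD u 0 + 1), (r.set i true).map mkv, w + 1, Q ++ [i]) := by
          simp only [stepA]
          rw [if_pos h1, if_pos (And.intro hv h1), List.map_set]
          rfl
        have hrec := ih (l.set u (l.getD u 0 + 1)) (r.set i true) (w + 1) (Q ++ [i]) hnd'
          (by intro x hx; simpa using hlen x (by simp [hx]))
        have hnew_cons : (i :: is).filter (pnew row r) = i :: is.filter (pnew row r) := by
          rw [List.filter_cons, if_pos (by unfold pnew; rw [h2, decide_eq_true h1]; rfl)]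
        have hmark : markAll (i :: is.filter (pnew row r)) r
            = markAll (is.filter (pnew row r)) (r.set i true) := by
          simp only [markAll, List.foldl_cons]
        have hw : (w + 1) + ((is.filter (pnew row r)).length : Int)
            = w + (((is.filter (pnew row r)).length + 1 : Nat) : Int) := by
          push_cast
          ring
        rw [List.foldl_cons, hstepA, hrec, hfilter_new_set, hlupd1, hnew_cons, hcnt_cons,
          List.length_cons, List.length_cons, hmark, hw]
        simp [List.append_assoc]
      · -- row entry 1 but i already reached: only l[u] grows
        have h2' : r.getD i false = true := by
          cases h : r.getD i false
          · exact absurd h h2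
          · rfl
        have hv' : ¬ ((r.map mkv).getD i 0 ≠ 1 ∧ row.getD i 0 = 1) := by
          intro hc
          have := (mkv_getD_ne_one r i).mp hc.1
          rw [h2'] at this
          simp at this
        have hstepA : stepA row u (l, r.map mkv, w, Q) i
            = (l.set u (l.getD u 0 + 1), r.map mkv, w, Q) := by
          simp only [stepA]
          rw [if_pos h1, if_neg hv']
        have hrec := ih (l.set u (l.getD u 0 + 1)) r w Q hnd'
          (by intro x hx; exact hlen x (by simp [hx]))
        have hnew_cons : (i :: is).filter (pnew row r) = is.filter (pnew row r) := by
          rw [List.filter_cons, if_neg (by unfold pnew; rw [h2']; simp)]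
        rw [List.foldl_cons, hstepA, hrec, hlupd1, hnew_cons, hcnt_cons, List.length_cons]
    · -- row entry not 1: nothing changes
      have hstepA : stepA row u (l, r.map mkv, w, Q) i = (l, r.map mkv, w, Q) := by
        simp only [stepA]
        rw [if_neg h1, if_neg (fun hc => h1 hc.2)]
      have hrec := ih l r w Q hnd' (by intro x hx; exact hlen x (by simp [hx]))
      have hnew_cons : (i :: is).filter (pnew row r) = is.filter (pnew row r) := by
        rw [List.filter_cons, if_neg (by unfold pnew; rw [decide_eq_false h1]; simp)]
      have hcnt_cons : (i :: is).filter (pcnt row) = is.filter (pcnt row) := by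
        rw [List.filter_cons, if_neg (by unfold pcnt; rw [decide_eq_false h1]; simp)]
      rw [List.foldl_cons, hstepA, hrec, hnew_cons, hcnt_cons]

-- === A's BFS loop: its result is determined by a sound, closed visited set ===
lemma loopA_props (G : List (List Int)) (n sN : Nat) :
    ∀ (fuel : Nat) (l : List Int) (r : List Bool) (w : Int) (Q : List Nat),
    r.length = n → l.length = n → Q.Nodup →
    (∀ q ∈ Q, q < n ∧ r.getD q false = true) →
    Q.length + unre r ≤ fuel →
    (∀ j, j < n → l.getD j 0 = if r.getD j false = true ∧ j ∉ Q then degB G n j else 0) →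
    w = ((n - unre r : Nat) : Int) →
    (∀ j, r.getD j false = true → Reach G n sN j) →
    (∀ u, u < n → r.getD u false = true → u ∉ Q →
        ∀ i, i < n → edgeG G u i → r.getD i false = true) →
    ∃ rf : List Bool, rf.length = n
      ∧ (∀ j, r.getD j false = true → rf.getD j false = true)
      ∧ (∀ j, rf.getD j false = true → Reach G n sN j)
      ∧ ClosedS G n rf
      ∧ loopA G n fuel (l, r.map mkv, w, Q)
          = ((List.range n).map (fun u => if rf.getD u false then degB G n u else 0),
             ((n - unre rf : Nat) : Int)) := by
  intro fuel
  induction fuel with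
  | zero =>
    intro l r w Q hr hl hnd hq hfuel hinv hw hS hC
    have hQ : Q = [] := by
      cases Q with
      | nil => rfl
      | cons a b => simp at hfuel
    subst hQ
    refine ⟨r, hr, fun j h => h, hS, fun u hu hur => hC u hu hur (by simp), ?_⟩
    simp only [loopA]
    rw [hw]
    refine Prod.ext ?_ rfl
    apply List.ext_getElem
    · simp [hl]
    · intro j hj hj'
      have hjn : j < n := by simpa [hl] using hj
      have h2 : l.getD j 0 = if r.getD j false = true then degB G n j else 0 := by
        rw [hinv j hjn]
        by_cases h : r.getD j false = true <;> simp [h]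
      simp only [List.getElem_map, List.getElem_range]
      rw [← h2]
      simp [List.getD, List.getElem?_eq_getElem (show j < l.length by simpa [hl] using hjn)]
  | succ fuel ih =>
    intro l r w Q hr hl hnd hq hfuel hinv hw hS hC
    cases Q with
    | nil =>
      refine ⟨r, hr, fun j h => h, hS, fun u hu hur => hC u hu hur (by simp), ?_⟩
      simp only [loopA]
      rw [hw]
      refine Prod.ext ?_ rfl
      apply List.ext_getElem
      · simp [hl]
      · intro j hj hj'
        have hjn : j < n := by simpa [hl] using hj
        have h2 : l.getD j 0 = if r.getD j false = true then degB G n j else 0 := by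
          rw [hinv j hjn]
          by_cases h : r.getD j false = true <;> simp [h]
        simp only [List.getElem_map, List.getElem_range]
        rw [← h2]
        simp [List.getD, List.getElem?_eq_getElem (show j < l.length by simpa [hl] using hjn)]
    | cons u Q' =>
      obtain ⟨hun, hmk⟩ := hq u (by simp)
      have hndQ' : Q'.Nodup := (List.nodup_cons.mp hnd).2
      have huQ' : u ∉ Q' := (List.nodup_cons.mp hnd).1
      set row := G.getD u [] with hrow
      set new := (List.range n).filter (pnew row r) with hnew
      have hfs := fold_sim row u (List.range n) l r w Q' (List.nodup_range)
        (by intro i hi; rw [hr]; simpa using hi)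
      have hnewlt : ∀ j ∈ new, j < n ∧ r.getD j false = false := by
        intro j hj
        rw [hnew, List.mem_filter] at hj
        refine ⟨by simpa using hj.1, ?_⟩
        have := hj.2
        simp [pnew] at this
        exact this.1
      have hnewedge : ∀ j ∈ new, edgeG G u j := by
        intro j hj
        rw [hnew, List.mem_filter] at hj
        have := hj.2
        simp [pnew] at this
        exact this.2
      have hnewnd : new.Nodup := List.Nodup.filter _ List.nodup_range
      have hdisj : ∀ j ∈ new, j ∉ Q' := by
        intro j hj hjQ
        have := (hq j (by simp [hjQ])).2
        rw [(hnewlt j hj).2] at this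
        simp at this
      have hunew : u ∉ new := by
        intro hu
        have := (hnewlt u hu).2
        rw [hmk] at this
        simp at this
      set r1 := markAll new r with hr1
      have hr1len : r1.length = n := by rw [hr1, markAll_length, hr]
      have hr1getD : ∀ j, r1.getD j false = (r.getD j false || decide (j ∈ new)) := by
        intro j
        rw [hr1]
        exact markAll_getD new r (fun i hi => by rw [hr]; exact (hnewlt i hi).1) j
      have hunre : unre r1 + new.length = unre r := by
        rw [hr1]
        exact unre_markAll new r hnewnd
          (fun i hi => ⟨by rw [hr]; exact (hnewlt i hi).1, (hnewlt i hi).2⟩)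
      have hulen : u < l.length := by rw [hl]; exact hun
      have hlu0 : l.getD u 0 = 0 := by
        rw [hinv u hun]
        simp
      set cnt := ((List.range n).filter (pcnt row)).length with hcnt
      have hl1 : lupd l u cnt = l.set u (cnt : Int) := by
        unfold lupd
        rw [if_pos hulen, hlu0]
        norm_num
      have hdegu : degB G n u = (cnt : Int) := by
        rw [degB_eq_filter]
      have hunre_le : unre r ≤ n := by rw [← hr]; exact unre_le_length r
      obtain ⟨rf, p1, p2, p3, p4, p5⟩ := ih (l.set u (cnt : Int)) r1 (w + (new.length : Int))
        (Q' ++ new)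
        hr1len (by simp [hl])
        (by
          refine List.Nodup.append hndQ' hnewnd ?_
          intro a ha hb
          exact hdisj a hb ha)
        (by
          intro q hqmem
          rcases List.mem_append.mp hqmem with hmem | hmem
          · obtain ⟨h1, h2⟩ := hq q (by simp [hmem])
            exact ⟨h1, by rw [hr1getD, h2]; simp⟩
          · exact ⟨(hnewlt q hmem).1, by rw [hr1getD]; simp [hmem]⟩)
        (by
          simp only [List.length_append]
          simp only [List.length_cons] at hfuel
          omega)
        (by
          intro j hjn
          rcases eq_or_ne j u with rfl | hne
          · rw [getD_set_self _ _ _ _ hulen, hr1getD]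
            have hmk' : r[j]?.getD false = true := hmk
            simp [hmk', huQ', hunew, hdegu]
          · rw [getD_set_ne _ _ _ _ _ (Ne.symm hne), hinv j hjn, hr1getD]
            by_cases hjnew : j ∈ new
            · have hrj' : r[j]?.getD false = false := (hnewlt j hjnew).2
              simp [hrj', hjnew]
            · by_cases hrj : r.getD j false = true
              · have hrj' : r[j]?.getD false = true := hrj
                by_cases hq' : j ∈ Q' <;> simp [hrj', hne, hjnew, hq']
              · have hrj' : r[j]?.getD false = false := by
                  cases h : r.getD j false
                  · exact h
                  · exact absurd h hrj
                simp [hrj', hjnew])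
        (by
          rw [hw]
          have hle : new.length ≤ unre r := by omega
          omega)
        (by
          intro j hj
          rw [hr1getD] at hj
          rcases Bool.or_eq_true_iff.mp hj with h | h
          · exact hS j h
          · have hjnew : j ∈ new := of_decide_eq_true h
            exact Relation.ReflTransGen.tail (hS u hmk)
              ⟨hun, (hnewlt j hjnew).1, hnewedge j hjnew⟩)
        (by
          intro x hx hxr hxQ i hin hie
          rw [hr1getD]
          rw [hr1getD] at hxr
          rcases eq_or_ne x u with rfl | hne
          · -- all successors of u are now marked
            by_cases hri : r.getD i false = true
            · rw [Bool.or_eq_true]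
              exact Or.inl hri
            · have hri' : r.getD i false = false := by
                cases h : r.getD i false
                · rfl
                · exact absurd h hri
              have hie' : row.getD i 0 = 1 := hie
              have : i ∈ new := by
                rw [hnew, List.mem_filter]
                refine ⟨by simpa using hin, ?_⟩
                simp [pnew]
                exact ⟨hri', hie'⟩
              rw [Bool.or_eq_true]
              exact Or.inr (decide_eq_true this)
          · have hxQ' : x ∉ Q' := fun h => hxQ (List.mem_append.mpr (Or.inl h))
            have hxnew : x ∉ new := fun h => hxQ (List.mem_append.mpr (Or.inr h))
            have hxr' : r.getD x false = true := by
              rcases Bool.or_eq_true_iff.mp hxr with h | h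
              · exact h
              · exact absurd (of_decide_eq_true h) hxnew
            have := hC x hx hxr' (by simp [hne, hxQ']) i hin hie
            rw [Bool.or_eq_true]
            exact Or.inl this)
      refine ⟨rf, p1, ?_, p3, p4, ?_⟩
      · intro j hj
        apply p2
        rw [hr1getD, hj]
        simp
      · show loopA G n (fuel + 1) (l, r.map mkv, w, u :: Q') = _
        have hA : loopA G n (fuel + 1) (l, r.map mkv, w, u :: Q')
            = loopA G n fuel (lupd l u cnt, r1.map mkv, w + (new.length : Int), Q' ++ new) := by
          simp only [loopA]
          rw [← hnew] at hfs
          rw [hfs]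
        rw [hA, hl1]
        exact p5

lemma init_replicate_mkv (n : Nat) (sN : Nat) :
    (List.replicate n (-1 : Int)).set sN 1 = (((List.replicate n false).set sN true).map mkv) := by
  rw [List.map_set]
  simp [mkv, List.map_replicate]

lemma unre_init (n : Nat) (sN : Nat) (h : sN < n) :
    unre ((List.replicate n false).set sN true) + 1 = n := by
  have := countP_set_true (List.replicate n false) sN (by simpa using h)
    (by simp [List.getD, List.getElem?_replicate, h])
  unfold unre
  rw [this]
  simp [List.countP_replicate]

-- two sound, closed sets of length n containing the start coincide
lemma sets_eq (G : List (List Int)) (n sN : Nat) (r1 r2 : List Bool)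
    (h1 : r1.length = n) (h2 : r2.length = n)
    (hs1 : r1.getD sN false = true) (hs2 : r2.getD sN false = true)
    (hS1 : ∀ j, r1.getD j false = true → Reach G n sN j)
    (hS2 : ∀ j, r2.getD j false = true → Reach G n sN j)
    (hC1 : ClosedS G n r1) (hC2 : ClosedS G n r2) : r1 = r2 := by
  have hpt : ∀ j, r1.getD j false = r2.getD j false := by
    intro j
    by_cases ha : r1.getD j false = true
    · rw [ha, reach_mem_closed G n sN r2 hC2 hs2 j (hS1 j ha)]
    · by_cases hb : r2.getD j false = true
      · exact absurd (reach_mem_closed G n sN r1 hC1 hs1 j (hS2 j hb)) ha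
      · rw [Bool.not_eq_true] at ha hb
        rw [ha, hb]
  apply List.ext_getElem
  · rw [h1, h2]
  · intro j hj hj'
    have e1 : r1.getD j false = r1[j] := by
      simp [List.getD, List.getElem?_eq_getElem hj]
    have e2 : r2.getD j false = r2[j] := by
      simp [List.getD, List.getElem?_eq_getElem hj']
    rw [← e1, ← e2, hpt]

-- ===== VERDICT (by name: the statement is the Claim_ definition above) =====
theorem BFS_spec : Claim_equal_BFS := by
  intro G s _ hpre
  obtain ⟨hne, hlo, hhi, _⟩ := hpre
  unfold Spec_BFS
  set n := G.length with hn
  have hnpos : 0 < n := by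
    cases G
    · exact absurd rfl hne
    · simp [hn]
  set sN : Nat := (if s < 0 then s + n else s).toNat with hsN
  have hsNlt : sN < n := by
    rw [hsN]
    split
    · omega
    · omega
  set r0 := (List.replicate n false).set sN true with hr0
  have hr0len : r0.length = n := by simp [hr0]
  have hr0sN : r0.getD sN false = true := by
    rw [hr0]
    exact getD_set_self _ _ _ _ (by simpa using hsNlt)
  have hr0other : ∀ j, j ≠ sN → r0.getD j false = false := by
    intro j hj
    rw [hr0, getD_set_ne _ _ _ _ _ (Ne.symm hj)]
    rcases Nat.lt_or_ge j n with hlt | hge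
    · simp [List.getD, List.getElem?_replicate, hlt]
    · have hnone : (List.replicate n false)[j]? = none := by
        rw [List.getElem?_eq_none_iff]
        simpa using hge
      simp [List.getD, hnone]
  have hr0S : ∀ j, r0.getD j false = true → Reach G n sN j := by
    intro j hj
    rcases eq_or_ne j sN with rfl | hne'
    · exact Relation.ReflTransGen.refl
    · rw [hr0other j hne'] at hj
      exact absurd hj (by simp)
  have hu0 : unre r0 + 1 = n := by
    have := unre_init n sN hsNlt
    rw [← hr0] at this
    exact this
  -- A's side
  obtain ⟨rf, pf1, pf2, pf3, pf4, pf5⟩ := loopA_props G n sN (n + 1)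
    (List.replicate n 0) r0 1 [sN]
    hr0len (by simp)
    (by simp)
    (by intro q hq; simp at hq; subst hq; exact ⟨hsNlt, hr0sN⟩)
    (by simp only [List.length_cons, List.length_nil]; omega)
    (by
      intro j hj
      rcases eq_or_ne j sN with rfl | hne'
      · simp [List.getD, List.getElem?_replicate, hj]
      · have hro' : r0[j]?.getD false = false := hr0other j hne'
        simp [List.getD, List.getElem?_replicate, hj, hro'])
    (by omega)
    hr0S
    (by
      intro u hu hur huQ i hin hie
      rcases eq_or_ne u sN with rfl | hne'
      · exact absurd (List.mem_singleton.mpr rfl) huQ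
      · rw [hr0other u hne'] at hur
        exact absurd hur (by simp))
  have hfsN : rf.getD sN false = true := pf2 sN hr0sN
  -- B's side
  obtain ⟨q1, q2, q3, q4⟩ := satLoop_ok G n sN (n + 1) r0 hr0len hr0sN hr0S (by omega)
  set rB := satLoop G n (n + 1) r0 with hrB
  -- the two reached sets coincide
  have hEq : rf = rB := sets_eq G n sN rf rB pf1 q1 hfsN q2 pf3 q3 pf4 q4
  have hAdef : BFS G s = loopA G n (n + 1)
      (List.replicate n 0, (List.replicate n (-1)).set sN 1, 1, [sN]) := rfl
  have hBdef : BFS_alt G s = ((List.range n).map (fun u =>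
      if rB.getD u false then degB G n u else 0), sumReach rB) := rfl
  rw [hAdef, hBdef, init_replicate_mkv, ← hr0, pf5, hEq, sumReach_eq, q1]
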